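-- pv_equiv track=rewrite | github.com/GajareGaurav/Atgeir | Python/Day2/11.py | rearrange_number
-- ===== SOURCE A (Python) =====
-- def rearrange_number(num):
--     num_str = str(num)
--     length = len(num_str)
--     result = ""
--
--     i = 0
--     j = length - 1
--
--     while i < j:
--         result += num_str[i]
--         result += num_str[j]
--         i += 1
--         j -= 1
--
--     if i == j:
--         result += num_str[i]
--
--     return result
-- ===== SOURCE B (Python) =====
-- def rearrange_number(num):
--     s = str(num)
--     r = s[::-1]
--     return "".join(a + b for a, b in zip(s, r))[:len(s)]
-- ===== Notes on version B (the rewrite author's own statement) =====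
-- stated objective: idiomatic
-- what changed: Replaces the two converging indices, the explicit while loop and the odd-length middle branch with zipping the string against its materialised reverse, joining the pairs and truncating the over-generated interleaving with a slice.
import Mathlib
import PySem

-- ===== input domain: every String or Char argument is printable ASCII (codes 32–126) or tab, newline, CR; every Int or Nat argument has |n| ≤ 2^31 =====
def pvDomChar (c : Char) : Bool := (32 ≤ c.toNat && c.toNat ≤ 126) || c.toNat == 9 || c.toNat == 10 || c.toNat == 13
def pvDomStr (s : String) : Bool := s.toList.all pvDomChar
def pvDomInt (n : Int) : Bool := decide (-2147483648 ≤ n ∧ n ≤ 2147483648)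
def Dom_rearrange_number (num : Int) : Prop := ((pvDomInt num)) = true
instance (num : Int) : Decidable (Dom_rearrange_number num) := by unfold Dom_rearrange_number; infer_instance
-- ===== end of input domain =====

-- B interleaves the digit string with its materialised reverse by zip/join and
-- truncates with a slice, replacing A's two converging indices and the explicit
-- odd-length middle branch (idiomatic rewrite; return value proved equal everywhere).

-- ===== PORT A =====
-- A's while loop: state (i, j, result); the indices are always in range here,
-- so num_str[i] is ported as pyGetD with an unused default.
def pvALoop (cs : List Char) (i j : Int) (result : List Char) : List Char :=
  if i < j then
    pvALoop cs (i + 1) (j - 1)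
      (result ++ [PySem.List.pyGetD cs i ' ', PySem.List.pyGetD cs j ' '])
  else if i = j then result ++ [PySem.List.pyGetD cs i ' ']
  else result
termination_by (j - i).toNat
decreasing_by omega

def rearrange_number (num : Int) : String :=
  let cs := PySem.Int.toChars num      -- num_str = str(num)
  String.ofList (pvALoop cs 0 ((cs.length : Int) - 1) [])

-- ===== PORT B =====
def rearrange_number_alt (num : Int) : String :=
  let s := PySem.Int.toChars num                                  -- s = str(num)
  let r := (PySem.List.slice? s none none (-1)).getD []           -- r = s[::-1] (step -1 never raises)
  String.ofList (PySem.List.slice ((s.zip r).flatMap fun p => [p.1, p.2])   -- "".join(a+b for a,b in zip(s,r))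
      none (some ((s.length : Int))))                             -- [:len(s)]

-- ===== PRECONDITION & SPEC =====
def Spec_rearrange_number (num : Int) (out : String) : Prop := out = rearrange_number_alt num
instance (num : Int) (out : String) : Decidable (Spec_rearrange_number num out) := by unfold Spec_rearrange_number; infer_instance

-- ===== CLAIM (what is proved, stated in full; the proofs are below) =====
def Claim_equal_rearrange_number : Prop := ∀ (num : Int), Dom_rearrange_number num → Spec_rearrange_number num (rearrange_number num)

-- ===== LEMMAS AND PROOFS =====

-- Invariant of A's loop: with i = k and j = length - 1 - k (i + j = length - 1 is
-- preserved), the loop appends exactly the zip-interleaving of the two k-suffixes,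
-- truncated to the number of characters still to be produced.
theorem pvALoop_eq (m : Nat) (cs : List Char) (k : Nat) (acc : List Char)
    (hm : cs.length - 2 * k ≤ m) :
    pvALoop cs (k : Int) ((cs.length : Int) - 1 - k) acc
      = acc ++ ((((cs.drop k).zip (cs.reverse.drop k)).flatMap
          fun p => [p.1, p.2]).take (cs.length - 2 * k)) := by
  induction m generalizing k acc with
  | zero =>
      -- 2*k ≥ length: the loop condition and the middle branch both fail
      rw [pvALoop, if_neg (by omega), if_neg (by omega)]
      have h0 : cs.length - 2 * k = 0 := by omega
      simp [h0]
  | succ m ih =>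
      by_cases hlt : 2 * k + 1 < cs.length
      · -- i < j : one iteration, then the induction hypothesis at k + 1
        have hk : k < cs.length := by omega
        have hj : cs.length - 1 - k < cs.length := by omega
        rw [pvALoop, if_pos (by omega)]
        have hi1 : (k : Int) + 1 = ((k + 1 : Nat) : Int) := by omega
        have hj1 : (cs.length : Int) - 1 - (k : Int) - 1
            = (cs.length : Int) - 1 - ((k + 1 : Nat) : Int) := by omega
        rw [hi1, hj1, ih (k + 1) _ (by omega)]
        -- identify the two characters fetched by A
        have ha : PySem.List.pyGetD cs (k : Int) ' ' = cs[k] := by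
          rw [PySem.List.pyGetD_natCast, List.getD_eq_getElem _ _ hk]
        have hbi : ((cs.length : Int) - 1 - (k : Int)) = ((cs.length - 1 - k : Nat) : Int) := by
          push_cast; omega
        have hb : PySem.List.pyGetD cs ((cs.length : Int) - 1 - (k : Int)) ' '
            = cs[cs.length - 1 - k] := by
          rw [hbi, PySem.List.pyGetD_natCast, List.getD_eq_getElem _ _ hj]
        -- expose the head pair of the zip on the right-hand side
        have hkr : k < cs.reverse.length := by simpa using hk
        have hd1 : cs.drop k = cs[k] :: cs.drop (k + 1) := List.drop_eq_getElem_cons hk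
        have hd2 : cs.reverse.drop k = cs[cs.length - 1 - k] :: cs.reverse.drop (k + 1) := by
          rw [List.drop_eq_getElem_cons hkr, List.getElem_reverse]
        have htk : cs.length - 2 * k = (cs.length - 2 * (k + 1)) + 2 := by omega
        rw [hd1, hd2, ha, hb, htk]
        simp only [List.zip_cons_cons, List.flatMap_cons, List.cons_append, List.nil_append,
          List.take_succ_cons, List.append_assoc]
      · by_cases heq : cs.length = 2 * k + 1
        · -- i = j : the middle character of an odd-length string
          have hk : k < cs.length := by omega
          rw [pvALoop, if_neg (by omega), if_pos (by omega)]
          have ha : PySem.List.pyGetD cs (k : Int) ' ' = cs[k] := by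
            rw [PySem.List.pyGetD_natCast, List.getD_eq_getElem _ _ hk]
          have hkr : k < cs.reverse.length := by simpa using hk
          have hd1 : cs.drop k = cs[k] :: cs.drop (k + 1) := List.drop_eq_getElem_cons hk
          obtain ⟨b, hd2⟩ : ∃ b, cs.reverse.drop k = b :: cs.reverse.drop (k + 1) :=
            ⟨_, List.drop_eq_getElem_cons hkr⟩
          have h1 : cs.length - 2 * k = 1 := by omega
          rw [hd1, hd2, ha, h1]
          simp only [List.zip_cons_cons, List.flatMap_cons, List.cons_append, List.nil_append]
          rw [List.take_succ_cons, List.take_zero]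
        · -- i > j : the loop produced everything already
          rw [pvALoop, if_neg (by omega), if_neg (by omega)]
          have h0 : cs.length - 2 * k = 0 := by omega
          simp [h0]

-- ===== VERDICT (by name: the statement is the Claim_ definition above) =====
theorem rearrange_number_spec : Claim_equal_rearrange_number := by
  intro num _
  unfold Spec_rearrange_number
  have h := pvALoop_eq (PySem.Int.toChars num).length (PySem.Int.toChars num) 0 [] (by omega)
  simp only [Nat.cast_zero, sub_zero, List.drop_zero, Nat.mul_zero, Nat.sub_zero,
    List.nil_append] at h
  show String.ofList (pvALoop (PySem.Int.toChars num) 0 (((PySem.Int.toChars num).length : Int) - 1) [])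
      = String.ofList (PySem.List.slice
          (((PySem.Int.toChars num).zip
              ((PySem.List.slice? (PySem.Int.toChars num) none none (-1)).getD [])).flatMap
            fun p => [p.1, p.2])
          none (some (((PySem.Int.toChars num).length : Int))))
  rw [h, PySem.List.slice?_none_none_neg_one, Option.getD_some,
    PySem.List.slice_to_natCast]
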